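-- pv_equiv track=rewrite | github.com/smsxgz/euler_project | problems/problem@41~60/problem_41/Pandigital_prime.py | permutation2
-- ===== SOURCE A (Python) =====
-- def permutation2(dig_list):
--     n = len(dig_list)
--     if n == 1:
--         m = dig_list[0]
--         if m in [1, 3, 7]:
--             return [m]
--         else:
--             return []
--     l = []
--     k = 10**(n - 1)
--     for i in range(n):
--         j = dig_list[i]
--         for ll in permutation2(dig_list[:i] + dig_list[i + 1:]):
--             l.append(j * k + ll)
--     return l
-- ===== SOURCE B (Python) =====
-- def permutation2(dig_list):
--     # Iterative DFS with an explicit stack of (prefix value, remaining digits),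
--     # building each number left-to-right by v = v*10 + d instead of A's
--     # bottom-up j*10**(n-1) + ll recursion.
--     out = []
--     stack = [(0, dig_list)]
--     while stack:
--         v, rem = stack.pop()
--         if len(rem) == 1:
--             if rem[0] in (1, 3, 7):
--                 out.append(v * 10 + rem[0])
--         else:
--             for i in range(len(rem) - 1, -1, -1):
--                 stack.append((v * 10 + rem[i], rem[:i] + rem[i + 1:]))
--     return out
-- ===== Notes on version B (the rewrite author's own statement) =====
-- stated objective: alternative
-- what changed: Replaces A's bottom-up recursion (combining j*10**(n-1) with recursively-built suffix values) by an iterative DFS over an explicit stack of (prefix value, remaining digits) pairs, building each number top-down via v = v*10 + d; same output list in the same order.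
import Mathlib
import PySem

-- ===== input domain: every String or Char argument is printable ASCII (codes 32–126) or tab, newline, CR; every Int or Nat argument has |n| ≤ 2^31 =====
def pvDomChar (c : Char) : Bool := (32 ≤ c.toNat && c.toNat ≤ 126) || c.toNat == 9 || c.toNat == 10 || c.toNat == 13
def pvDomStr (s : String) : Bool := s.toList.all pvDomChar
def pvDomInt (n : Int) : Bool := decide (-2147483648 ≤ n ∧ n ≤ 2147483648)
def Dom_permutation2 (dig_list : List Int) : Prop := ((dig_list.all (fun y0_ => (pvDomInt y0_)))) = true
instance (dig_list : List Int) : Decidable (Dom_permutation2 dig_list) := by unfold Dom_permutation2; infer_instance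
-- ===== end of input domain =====

-- B replaces A's bottom-up recursion by an iterative DFS with an explicit stack of
-- (prefix value, remaining digits) pairs, building each number top-down via v = v*10 + d
-- (alternative decomposition, same cost).

-- ===== PORT A =====
-- literal port of A: n==1 base case, else for i in range(n) append j*k + ll for every ll
-- of the recursive call on dig_list[:i] + dig_list[i+1:]; `.attach` is termination plumbing only
def permutation2 (dig_list : List Int) : List Int :=
  if dig_list.length = 1 then
    let m := dig_list.headD 0
    if m = 1 ∨ m = 3 ∨ m = 7 then [m] else []
  else
    let n := dig_list.length
    let k : Int := 10 ^ (n - 1)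
    (List.range n).attach.flatMap (fun i =>
      (permutation2 (dig_list.take i.1 ++ dig_list.drop (i.1 + 1))).map
        (fun ll => dig_list.getD i.1 0 * k + ll))
termination_by dig_list.length
decreasing_by
  rename_i i
  have hi := i.2
  simp only [List.mem_range] at hi
  simp only [List.length_append, List.length_take, List.length_drop]
  omega

-- ===== PORT B =====
-- weight used only for termination of the stack loop
def pvFrameW (p : Int × List Int) : Nat := (p.2.length + 1).factorial

-- the while-loop of Source B; the stack's head is its top (Python pushes reversed(range)
-- at the list end and pops from the end, which is exactly prepending in range order here)
def permB_loop (stack : List (Int × List Int)) (out : List Int) : List Int :=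
  match stack with
  | [] => out
  | (v, rem) :: rest =>
    if rem.length = 1 then
      let d := rem.headD 0
      if d = 1 ∨ d = 3 ∨ d = 7 then permB_loop rest (out ++ [v * 10 + d])
      else permB_loop rest out
    else
      permB_loop
        ((List.range rem.length).map
          (fun i => (v * 10 + rem.getD i 0, rem.take i ++ rem.drop (i + 1))) ++ rest)
        out
termination_by (stack.map pvFrameW).sum
decreasing_by
  · simp [pvFrameW]
    exact Nat.factorial_pos _
  · simp [pvFrameW]
    exact Nat.factorial_pos _
  · simp only [List.map_append, List.sum_append, List.map_map]
    have hlen : ∀ i ∈ List.range rem.length,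
        (pvFrameW ∘ fun i => (v * 10 + rem.getD i 0, rem.take i ++ rem.drop (i + 1))) i
          = rem.length.factorial := by
      intro i hi
      simp only [List.mem_range] at hi
      simp only [Function.comp, pvFrameW, List.length_append, List.length_take, List.length_drop]
      congr 1
      omega
    rw [List.map_congr_left hlen]
    simp only [List.map_const', List.sum_replicate, smul_eq_mul, List.length_range,
      List.map_cons, List.sum_cons, pvFrameW]
    have hf : rem.length * rem.length.factorial < (rem.length + 1).factorial := by
      rw [Nat.factorial_succ]
      have := Nat.factorial_pos rem.length
      nlinarith
    omega

def permutation2_alt (dig_list : List Int) : List Int :=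
  permB_loop [(0, dig_list)] []

-- ===== PRECONDITION & SPEC =====
def Spec_permutation2 (dig_list : List Int) (out : List Int) : Prop := out = permutation2_alt dig_list
instance (dig_list : List Int) (out : List Int) : Decidable (Spec_permutation2 dig_list out) := by unfold Spec_permutation2; infer_instance

-- ===== CLAIM (what is proved, stated in full; the proofs are below) =====
def Claim_equal_permutation2 : Prop := ∀ (dig_list : List Int), Dom_permutation2 dig_list → Spec_permutation2 dig_list (permutation2 dig_list)

-- ===== LEMMAS AND PROOFS =====

-- A's recursion restated without the termination `.attach`
lemma permutation2_def (l : List Int) (h : ¬ l.length = 1) :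
    permutation2 l = (List.range l.length).flatMap (fun i =>
      (permutation2 (l.take i ++ l.drop (i + 1))).map
        (fun ll => l.getD i 0 * 10 ^ (l.length - 1) + ll)) := by
  conv_lhs => rw [permutation2]
  rw [if_neg h]
  conv_rhs => rw [← List.attach_map_subtype_val (List.range l.length)]
  rw [List.flatMap_map]

-- the value a stack frame (v, rem) eventually contributes to the output
def pvSub (v : Int) (rem : List Int) : List Int :=
  (permutation2 rem).map (fun ll => v * 10 ^ rem.length + ll)

lemma pvSub_single (v d : Int) :
    pvSub v [d] = if d = 1 ∨ d = 3 ∨ d = 7 then [v * 10 + d] else [] := by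
  have h1 : permutation2 [d] = if d = 1 ∨ d = 3 ∨ d = 7 then [d] else [] := by
    rw [permutation2]
    simp
  rw [pvSub, h1]
  split_ifs <;> simp [pow_one]

lemma pvSub_step (v : Int) (rem : List Int) (h : ¬ rem.length = 1) :
    (List.range rem.length).flatMap
      (fun i => pvSub (v * 10 + rem.getD i 0) (rem.take i ++ rem.drop (i + 1)))
      = pvSub v rem := by
  conv_rhs => rw [pvSub, permutation2_def rem h]
  rw [List.map_flatMap]
  refine List.flatMap_congr ?_
  intro i hi
  simp only [List.mem_range] at hi
  have hlen : (rem.take i ++ rem.drop (i + 1)).length = rem.length - 1 := by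
    simp only [List.length_append, List.length_take, List.length_drop]
    omega
  rw [pvSub, List.map_map, hlen]
  refine List.map_congr_left ?_
  intro ll _
  simp only [Function.comp]
  have h10 : (10 : Int) ^ rem.length = 10 ^ (rem.length - 1) * 10 := by
    rw [← pow_succ]
    congr 1
    omega
  rw [h10]
  ring

lemma permB_loop_spec (stack : List (Int × List Int)) (out : List Int) :
    permB_loop stack out = out ++ stack.flatMap (fun p => pvSub p.1 p.2) := by
  induction stack, out using permB_loop.induct with
  | case1 out => simp [permB_loop]
  | case2 out v rem rest h d hd ih =>
    have hrem : rem = [rem.headD 0] := by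
      match rem, h with
      | [a], _ => simp
    rw [permB_loop, if_pos h, if_pos hd, ih]
    conv_rhs => rw [hrem]
    simp only [List.flatMap_cons, pvSub_single]
    rw [if_pos hd, List.append_assoc]
  | case3 out v rem rest h d hd ih =>
    have hrem : rem = [rem.headD 0] := by
      match rem, h with
      | [a], _ => simp
    rw [permB_loop, if_pos h, if_neg hd, ih]
    conv_rhs => rw [hrem]
    simp only [List.flatMap_cons, pvSub_single]
    rw [if_neg hd]
    simp
  | case4 out v rem rest h ih =>
    rw [permB_loop, if_neg h, ih]
    rw [List.flatMap_append, List.flatMap_map]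
    simp only [pvSub_step v rem h]
    simp [List.flatMap_cons]

-- ===== VERDICT (by name: the statement is the Claim_ definition above) =====
theorem permutation2_spec : Claim_equal_permutation2 := by
  intro dig_list _
  unfold Spec_permutation2 permutation2_alt
  rw [permB_loop_spec]
  simp [pvSub]
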